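-- pv_equiv track=rewrite | github.com/suhasdevmane/OntoSage | rag-service/graphdbRAG/graphdb_retriever.py | _create_context_summary
-- ===== SOURCE A (Python) =====
-- from typing import Dict, Any, List, Optional, Tuple
--
-- def _create_context_summary(triples: List[Dict], entity_iris: List[str]) -> str:
--     """Create human-readable summary of retrieved context"""
--     if not triples:
--         return "No context found."
--
--     summary_lines = [
--         f"Retrieved {len(triples)} triples about {len(entity_iris)} entities:",
--         ""
--     ]
--
--     # Group by subject
--     by_subject = {}
--     for triple in triples:
--         s = triple['subject']
--         if s not in by_subject:
--             by_subject[s] = []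
--         by_subject[s].append(triple)
--
--     # Ignored types to save space (generic classes)
--     ignored_types = {
--         'rdfs:Resource', 'brick:Class', 'brick:Entity',
--         'owl:NamedIndividual'
--     }
--
--     # Format (limit to first 15 entities to avoid token explosion)
--     for i, (subject, subject_triples) in enumerate(list(by_subject.items())[:15]):
--         summary_lines.append(f"{subject}:")
--
--         # Filter and Sort
--         formatted_props = []
--         for t in subject_triples:
--             p = t['predicate']
--             o = t['object']
--
--             # Skip generic types
--             if p == 'rdf:type' and any(ignored in o for ignored in ignored_types):
--                 continue
--
--             formatted_props.append((p, o))
--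
--         # Sort: Labels first, then types, then others
--         def sort_key(item):
--             p, o = item
--             if 'label' in p.lower():
--                 return 0
--             if 'type' in p.lower():
--                 return 1
--             return 2
--
--         formatted_props.sort(key=sort_key)
--
--         # Add to summary (limit 20 properties per entity)
--         for p, o in formatted_props[:20]:
--             summary_lines.append(f"  {p} {o}")
--
--         summary_lines.append("")
--
--     if len(by_subject) > 15:
--         summary_lines.append(f"... and {len(by_subject) - 15} more entities")
--
--     return "\n".join(summary_lines)
-- ===== SOURCE B (Python) =====
-- def _create_context_summary(triples, entity_iris):
--     """Create human-readable summary of retrieved context"""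
--     if not triples:
--         return "No context found."
--
--     # Distinct subjects in first-seen order (no grouping dict: each displayed
--     # subject's triples are collected by a rescan of the triple list).
--     subjects = list(dict.fromkeys(t['subject'] for t in triples))
--
--     ignored_types = ('rdfs:Resource', 'brick:Class', 'brick:Entity',
--                      'owl:NamedIndividual')
--
--     def block(s):
--         # One pass over the triples: keep this subject's, drop ignored types,
--         # and partition the formatted lines into labels / types / others
--         # (encounter order inside each bucket reproduces A's stable sort).
--         labels, types, others = [], [], []
--         for t in triples:
--             if t['subject'] != s:
--                 continue
--             p, o = t['predicate'], t['object']
--             if p == 'rdf:type' and any(ig in o for ig in ignored_types):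
--                 continue
--             line = "  %s %s" % (p, o)
--             if 'label' in p.lower():
--                 labels.append(line)
--             elif 'type' in p.lower():
--                 types.append(line)
--             else:
--                 others.append(line)
--         return "\n".join([s + ":"] + (labels + types + others)[:20] + [""])
--
--     parts = ["Retrieved %d triples about %d entities:" % (len(triples), len(entity_iris)), ""]
--     parts += [block(s) for s in subjects[:15]]
--     if len(subjects) > 15:
--         parts.append("... and %d more entities" % (len(subjects) - 15))
--     return "\n".join(parts)
-- ===== Notes on version B (the rewrite author's own statement) =====
-- stated objective: alternative
-- what changed: B drops A's grouping dict and per-entity stable sort entirely: it computes the distinct subjects in first-seen order (dict.fromkeys), rescans the triple list per displayed subject while partitioning the formatted lines into labels/types/others buckets in one pass, builds each entity block as its own joined string and joins the blocks at the end.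
import Mathlib
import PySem

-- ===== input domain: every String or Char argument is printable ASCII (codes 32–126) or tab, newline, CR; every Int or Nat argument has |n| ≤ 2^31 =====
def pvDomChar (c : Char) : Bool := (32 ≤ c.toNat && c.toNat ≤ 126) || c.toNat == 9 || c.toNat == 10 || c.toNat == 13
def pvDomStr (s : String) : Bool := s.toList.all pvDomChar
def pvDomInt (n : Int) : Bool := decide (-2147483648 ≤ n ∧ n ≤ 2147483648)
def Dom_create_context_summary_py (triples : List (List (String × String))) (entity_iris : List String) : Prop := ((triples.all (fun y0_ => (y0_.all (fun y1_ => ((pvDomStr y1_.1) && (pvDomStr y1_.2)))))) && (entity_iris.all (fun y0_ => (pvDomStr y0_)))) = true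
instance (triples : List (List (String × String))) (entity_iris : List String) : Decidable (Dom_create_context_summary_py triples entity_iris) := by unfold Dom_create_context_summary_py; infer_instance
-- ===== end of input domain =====

-- B drops A's grouping dict and per-entity stable sort: it dedups the subjects in
-- first-seen order, rescans the triples per displayed subject while bucketing the
-- formatted lines (labels/types/others), and joins each block separately
-- (objective: alternative; same return value).

-- ===== PORT A =====
-- triple[k]: Python dict lookup (KeyError excluded by Pre_, under which the key is
-- present and getD's default is never used)
def pvGet (t : List (String × String)) (k : String) : String :=
  (PySem.Dict.mk t).getD k ""

-- A's set literal `ignored_types` (only used via order-independent `any`)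
def pvIgnoredTypes : List String :=
  PySem.Set.ofList ["rdfs:Resource", "brick:Class", "brick:Entity", "owl:NamedIndividual"]

-- A's sort_key
def pvSortKey (item : String × String) : Int :=
  if PySem.Str.isIn "label" (PySem.Str.lower item.1) then 0
  else if PySem.Str.isIn "type" (PySem.Str.lower item.1) then 1
  else 2

def create_context_summary_py (triples : List (List (String × String))) (entity_iris : List String) : String :=
  if triples = [] then "No context found."
  else
    let summary_lines : List String :=
      ["Retrieved " ++ PySem.Int.toStr (triples.length : Int) ++ " triples about " ++
         PySem.Int.toStr (entity_iris.length : Int) ++ " entities:", ""]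
    -- group by subject (`if s not in by_subject: by_subject[s] = []; by_subject[s].append(triple)`)
    let by_subject : PySem.Dict String (List (List (String × String))) :=
      triples.foldl (fun d t => d.modify (pvGet t "subject") [] (· ++ [t])) (PySem.Dict.mk [])
    -- `for i, (subject, subject_triples) in enumerate(list(by_subject.items())[:15])` (i unused)
    let summary_lines :=
      (PySem.List.slice by_subject.items none (some 15)).foldl
        (fun lines it =>
          let subject := it.1
          let subject_triples := it.2
          let lines := lines ++ [subject ++ ":"]
          let formatted_props : List (String × String) :=
            subject_triples.foldl
              (fun fp t =>
                let p := pvGet t "predicate"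
                let o := pvGet t "object"
                if p == "rdf:type" && pvIgnoredTypes.any (fun ig => PySem.Str.isIn ig o) then fp
                else fp ++ [(p, o)]) []
          let formatted_props := PySem.List.sorted formatted_props pvSortKey
          let lines :=
            (PySem.List.slice formatted_props none (some 20)).foldl
              (fun lines po => lines ++ ["  " ++ po.1 ++ " " ++ po.2]) lines
          lines ++ [""]) summary_lines
    let summary_lines :=
      if 15 < by_subject.items.length then
        summary_lines ++ ["... and " ++ PySem.Int.toStr ((by_subject.items.length : Int) - 15) ++ " more entities"]
      else summary_lines
    PySem.Str.join "\n" summary_lines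

-- ===== PORT B =====
-- B's tuple literal `ignored_types`
def pvIgnored : List String :=
  ["rdfs:Resource", "brick:Class", "brick:Entity", "owl:NamedIndividual"]

-- B's inner helper `block(s)`: one gated pass over all triples, bucketing the
-- already-formatted lines, then one joined string for the whole entity block
def pvBlock (triples : List (List (String × String))) (s : String) : String :=
  let bu :=
    triples.foldl
      (fun bu t =>
        if !(pvGet t "subject" == s) then bu
        else
          let p := pvGet t "predicate"
          let o := pvGet t "object"
          if p == "rdf:type" && pvIgnored.any (fun ig => PySem.Str.isIn ig o) then bu
          else
            let line := "  " ++ p ++ " " ++ o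
            if PySem.Str.isIn "label" (PySem.Str.lower p) then (bu.1 ++ [line], bu.2.1, bu.2.2)
            else if PySem.Str.isIn "type" (PySem.Str.lower p) then (bu.1, bu.2.1 ++ [line], bu.2.2)
            else (bu.1, bu.2.1, bu.2.2 ++ [line]))
      (([], [], []) : List String × List String × List String)
  PySem.Str.join "\n" ([s ++ ":"] ++ PySem.List.slice (bu.1 ++ bu.2.1 ++ bu.2.2) none (some 20) ++ [""])

def create_context_summary_py_alt (triples : List (List (String × String))) (entity_iris : List String) : String :=
  if triples = [] then "No context found."
  else
    -- `subjects = list(dict.fromkeys(t['subject'] for t in triples))`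
    let subjects := PySem.List.dedup (triples.map (fun t => pvGet t "subject"))
    let parts : List String :=
      ["Retrieved " ++ PySem.Int.toStr (triples.length : Int) ++ " triples about " ++
         PySem.Int.toStr (entity_iris.length : Int) ++ " entities:", ""]
    let parts := parts ++ (PySem.List.slice subjects none (some 15)).map (pvBlock triples)
    let parts :=
      if 15 < subjects.length then
        parts ++ ["... and " ++ PySem.Int.toStr ((subjects.length : Int) - 15) ++ " more entities"]
      else parts
    PySem.Str.join "\n" parts

-- ===== PRECONDITION & SPEC =====
-- Pre_: exactly the inputs on which the Python A returns (no KeyError): every triple has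
-- the key 'subject', and every triple whose subject is among the first 15 distinct
-- subjects (the displayed entities, whose 'predicate'/'object' are read) also has the
-- keys 'predicate' and 'object'.
def Pre_create_context_summary_py (triples : List (List (String × String))) (entity_iris : List String) : Prop :=
  (triples.all (fun t => (PySem.Dict.mk t).contains "subject") &&
    triples.all (fun t =>
      !((PySem.List.dedup (triples.map (fun u => pvGet u "subject"))).take 15).contains (pvGet t "subject") ||
        ((PySem.Dict.mk t).contains "predicate" && (PySem.Dict.mk t).contains "object"))) = true
instance (triples : List (List (String × String))) (entity_iris : List String) : Decidable (Pre_create_context_summary_py triples entity_iris) := by unfold Pre_create_context_summary_py; infer_instance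

def pvWitness_create_context_summary_py : (List (List (String × String))) × List String :=
  ([[("subject", "s1"), ("predicate", "rdfs:label"), ("object", "Lamp")],
    [("subject", "s1"), ("predicate", "rdf:type"), ("object", "brick:Lamp")]], ["s1"])

def Spec_create_context_summary_py (triples : List (List (String × String))) (entity_iris : List String) (out : String) : Prop := out = create_context_summary_py_alt triples entity_iris
instance (triples : List (List (String × String))) (entity_iris : List String) (out : String) : Decidable (Spec_create_context_summary_py triples entity_iris out) := by unfold Spec_create_context_summary_py; infer_instance

-- ===== CLAIM (what is proved, stated in full; the proofs are below) =====
def Claim_equal_create_context_summary_py : Prop := ∀ (triples : List (List (String × String))) (entity_iris : List String), Dom_create_context_summary_py triples entity_iris → Pre_create_context_summary_py triples entity_iris → Spec_create_context_summary_py triples entity_iris (create_context_summary_py triples entity_iris)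

-- ===== LEMMAS AND PROOFS =====

-- abbreviations for the proofs (definitionally equal to pieces of the ports; not used by the ports)
def pvSubj (t : List (String × String)) : String := pvGet t "subject"
def pvSkip (t : List (String × String)) : Bool :=
  pvGet t "predicate" == "rdf:type" && pvIgnoredTypes.any (fun ig => PySem.Str.isIn ig (pvGet t "object"))
def pvPO (t : List (String × String)) : String × String := (pvGet t "predicate", pvGet t "object")
def pvIsL (po : String × String) : Bool := PySem.Str.isIn "label" (PySem.Str.lower po.1)
def pvIsT (po : String × String) : Bool := PySem.Str.isIn "type" (PySem.Str.lower po.1)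
def pvFmt (po : String × String) : String := "  " ++ po.1 ++ " " ++ po.2
def pvProps (ts : List (List (String × String))) : List (String × String) :=
  (ts.filter (fun t => !pvSkip t)).map pvPO
def pvStepA (fp : List (String × String)) (t : List (String × String)) : List (String × String) :=
  if pvSkip t then fp else fp ++ [pvPO t]
-- B's bucket step with the subject gate already discharged
def pvStepB (bu : List String × List String × List String) (t : List (String × String)) :
    List String × List String × List String :=
  if pvSkip t then bu
  else if pvIsL (pvPO t) then (bu.1 ++ [pvFmt (pvPO t)], bu.2.1, bu.2.2)
  else if pvIsT (pvPO t) then (bu.1, bu.2.1 ++ [pvFmt (pvPO t)], bu.2.2)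
  else (bu.1, bu.2.1, bu.2.2 ++ [pvFmt (pvPO t)])
-- B's full bucket step (with the gate)
def pvStepG (s : String) (bu : List String × List String × List String)
    (t : List (String × String)) : List String × List String × List String :=
  if !(pvSubj t == s) then bu else pvStepB bu t
-- the lines of one entity block, as A produces them
def pvBLines (it : String × List (List (String × String))) : List String :=
  [it.1 ++ ":"] ++ ((PySem.List.sorted (pvProps it.2) pvSortKey).take 20).map pvFmt ++ [""]
-- the grouping A's dict produces
def pvGroups (triples : List (List (String × String))) :
    List (String × List (List (String × String))) :=
  (PySem.List.dedup (triples.map pvSubj)).map (fun s => (s, triples.filter (fun t => pvSubj t == s)))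

-- insertBy facts for a three-valued key
lemma pv_insertBy_append_skip {α : Type} (before : α → α → Bool) (x : α) (A r : List α)
    (h : ∀ y ∈ A, before x y = false) :
    PySem.List.insertBy before x (A ++ r) = A ++ PySem.List.insertBy before x r := by
  induction A with
  | nil => simp
  | cons a A ih =>
    have ha : before x a = false := h a (by simp)
    simp [PySem.List.insertBy, ha, ih (fun y hy => h y (by simp [hy]))]

lemma pv_insertBy_all_before {α : Type} (before : α → α → Bool) (x : α) (r : List α)
    (h : ∀ y ∈ r, before x y = true) :
    PySem.List.insertBy before x r = x :: r := by
  cases r with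
  | nil => simp [PySem.List.insertBy]
  | cons y ys => simp [PySem.List.insertBy, h y (by simp)]

-- the stable insertion sort by a {0,1,2}-valued key is the three-bucket concatenation
lemma pv_ins_fold {α : Type} (key : α → Int) (hk : ∀ x, key x = 0 ∨ key x = 1 ∨ key x = 2)
    (l : List α) : ∀ (A B C : List α),
    (∀ y ∈ A, key y = 0) → (∀ y ∈ B, key y = 1) → (∀ y ∈ C, key y = 2) →
    l.foldl (fun acc x => PySem.List.insertBy (fun a b => decide (key a < key b)) x acc) (A ++ B ++ C)
      = (A ++ l.filter (fun x => key x == 0)) ++ (B ++ l.filter (fun x => key x == 1))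
          ++ (C ++ l.filter (fun x => key x == 2)) := by
  induction l with
  | nil => intro A B C _ _ _; simp
  | cons x l ih =>
    intro A B C hA hB hC
    rcases hk x with hx | hx | hx
    · have h1 : PySem.List.insertBy (fun a b => decide (key a < key b)) x (A ++ B ++ C)
          = A ++ [x] ++ B ++ C := by
        rw [List.append_assoc,
          pv_insertBy_append_skip _ _ A _ (fun y hy => by simp [hA y hy, hx]),
          pv_insertBy_all_before _ _ _ (fun y hy => by
            rcases List.mem_append.1 hy with h | h
            · simp [hB y h, hx]
            · simp [hC y h, hx])]
        simp
      have := ih (A ++ [x]) B C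
        (fun y hy => by rcases List.mem_append.1 hy with h | h
                        · exact hA y h
                        · simp at h; simp [h, hx]) hB hC
      simp only [List.foldl_cons, h1]
      rw [show A ++ [x] ++ B ++ C = A ++ [x] ++ (B ++ C) by simp, ← List.append_assoc] at this ⊢
      rw [this]
      simp [hx]
    · have h1 : PySem.List.insertBy (fun a b => decide (key a < key b)) x (A ++ B ++ C)
          = A ++ (B ++ [x]) ++ C := by
        rw [List.append_assoc,
          pv_insertBy_append_skip _ _ A _ (fun y hy => by simp [hA y hy, hx]),
          pv_insertBy_append_skip _ _ B _ (fun y hy => by simp [hB y hy, hx]),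
          pv_insertBy_all_before _ _ _ (fun y hy => by simp [hC y hy, hx])]
        simp
      have := ih A (B ++ [x]) C hA
        (fun y hy => by rcases List.mem_append.1 hy with h | h
                        · exact hB y h
                        · simp at h; simp [h, hx]) hC
      simp only [List.foldl_cons, h1]
      rw [this]
      simp [hx]
    · have h1 : PySem.List.insertBy (fun a b => decide (key a < key b)) x (A ++ B ++ C)
          = A ++ B ++ (C ++ [x]) := by
        rw [PySem.List.insertBy_of_forall_not_before _ _ _ (fun y hy => by
          rcases List.mem_append.1 hy with h | h
          · rcases List.mem_append.1 h with h2 | h2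
            · simp [hA y h2, hx]
            · simp [hB y h2, hx]
          · simp [hC y h, hx])]
        simp
      have := ih A B (C ++ [x]) hA hB
        (fun y hy => by rcases List.mem_append.1 hy with h | h
                        · exact hC y h
                        · simp at h; simp [h, hx])
      simp only [List.foldl_cons, h1]
      rw [this]
      simp [hx]

lemma pv_sorted_three {α : Type} (key : α → Int) (hk : ∀ x, key x = 0 ∨ key x = 1 ∨ key x = 2)
    (l : List α) :
    PySem.List.sorted l key
      = l.filter (fun x => key x == 0) ++ l.filter (fun x => key x == 1)
          ++ l.filter (fun x => key x == 2) := by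
  rw [PySem.List.sorted_eq_foldl_insertBy]
  have := pv_ins_fold key hk l [] [] [] (by simp) (by simp) (by simp)
  simpa using this

lemma pv_sortKey_cases (x : String × String) : pvSortKey x = 0 ∨ pvSortKey x = 1 ∨ pvSortKey x = 2 := by
  unfold pvSortKey; split_ifs <;> simp

-- A's filter loop produces pvProps
lemma pv_props_fold (ts : List (List (String × String))) :
    ts.foldl pvStepA [] = pvProps ts := by
  have h : ∀ (acc : List (String × String)), ∀ t ∈ ts,
      pvStepA acc t = (fun acc t => if (!pvSkip t) then acc ++ [pvPO t] else acc) acc t := by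
    intro acc t _
    unfold pvStepA
    cases h : pvSkip t <;> simp [h]
  rw [PySem.List.foldl_congr_mem _ _ _ _ h, PySem.List.foldl_append_if]
  simp [pvProps]

-- the sorted props equal the three label/type/other filters
lemma pv_sorted_eq_filters (l : List (String × String)) :
    PySem.List.sorted l pvSortKey
      = l.filter pvIsL ++ l.filter (fun x => !pvIsL x && pvIsT x)
          ++ l.filter (fun x => !pvIsL x && !pvIsT x) := by
  have e0 : (fun x : String × String => pvSortKey x == 0) = pvIsL := funext fun x => by
    unfold pvSortKey pvIsL
    split_ifs with h1 h2
    · rw [h1]; decide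
    · rw [Bool.not_eq_true] at h1; rw [h1]; decide
    · rw [Bool.not_eq_true] at h1; rw [h1]; decide
  have e1 : (fun x : String × String => pvSortKey x == 1) = (fun x => !pvIsL x && pvIsT x) :=
    funext fun x => by
      unfold pvSortKey pvIsL pvIsT
      split_ifs with h1 h2
      · rw [h1]; simp
      · rw [Bool.not_eq_true] at h1; rw [h1, h2]; decide
      · rw [Bool.not_eq_true] at h1 h2; rw [h1, h2]; decide
  have e2 : (fun x : String × String => pvSortKey x == 2) = (fun x => !pvIsL x && !pvIsT x) :=
    funext fun x => by
      unfold pvSortKey pvIsL pvIsT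
      split_ifs with h1 h2
      · rw [h1]; simp
      · rw [Bool.not_eq_true] at h1; rw [h1, h2]; decide
      · rw [Bool.not_eq_true] at h1 h2; rw [h1, h2]; decide
  rw [pv_sorted_three pvSortKey pv_sortKey_cases, e0, e1, e2]

-- B's gated fold is the ungated fold over the subject-filtered triples
lemma pv_gate_fold (s : String) (l : List (List (String × String))) :
    ∀ bu, l.foldl (pvStepG s) bu = (l.filter (fun t => pvSubj t == s)).foldl pvStepB bu := by
  induction l with
  | nil => intro bu; rfl
  | cons t l ih =>
    intro bu
    simp only [List.foldl_cons, List.filter_cons]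
    cases h : pvSubj t == s
    · rw [show pvStepG s bu t = bu from by unfold pvStepG; simp [h], ih]
      simp
    · rw [show pvStepG s bu t = pvStepB bu t from by unfold pvStepG; simp [h], ih]
      simp

-- B's bucket fold produces the three filters of pvProps, formatted
lemma pv_tri_fold (ts : List (List (String × String))) :
    ∀ (a b c : List String),
    ts.foldl pvStepB (a, b, c)
      = (a ++ ((pvProps ts).filter pvIsL).map pvFmt,
         b ++ ((pvProps ts).filter (fun x => !pvIsL x && pvIsT x)).map pvFmt,
         c ++ ((pvProps ts).filter (fun x => !pvIsL x && !pvIsT x)).map pvFmt) := by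
  induction ts with
  | nil => intro a b c; simp [pvProps]
  | cons t ts ih =>
    intro a b c
    have hp : pvProps (t :: ts)
        = if pvSkip t then pvProps ts else pvPO t :: pvProps ts := by
      cases h : pvSkip t <;> simp [pvProps, h]
    cases hs : pvSkip t
    · cases hl : pvIsL (pvPO t)
      · cases ht : pvIsT (pvPO t)
        · have hstep : pvStepB (a, b, c) t = (a, b, c ++ [pvFmt (pvPO t)]) := by
            unfold pvStepB; simp [hs, hl, ht]
          simp only [List.foldl_cons, hstep, ih]
          simp [hp, hs, hl, ht]
        · have hstep : pvStepB (a, b, c) t = (a, b ++ [pvFmt (pvPO t)], c) := by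
            unfold pvStepB; simp [hs, hl, ht]
          simp only [List.foldl_cons, hstep, ih]
          simp [hp, hs, hl, ht]
      · have hstep : pvStepB (a, b, c) t = (a ++ [pvFmt (pvPO t)], b, c) := by
          unfold pvStepB; simp [hs, hl]
        simp only [List.foldl_cons, hstep, ih]
        simp [hp, hs, hl]
    · have hstep : pvStepB (a, b, c) t = (a, b, c) := by
        unfold pvStepB; simp [hs]
      simp only [List.foldl_cons, hstep, ih]
      simp [hp, hs]

-- A's dict grouping, characterised
lemma pv_items_eq (triples : List (List (String × String))) :
    (triples.foldl (fun d t => d.modify (pvGet t "subject") [] (· ++ [t]))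
        (PySem.Dict.mk [])).items = pvGroups triples := by
  set d := triples.foldl (fun d t => d.modify (pvGet t "subject") [] (· ++ [t]))
    (PySem.Dict.mk ([] : List (String × List (List (String × String))))) with hd
  have hkeys : d.keys = PySem.List.dedup (triples.map pvSubj) := by
    rw [hd, PySem.Dict.keys_foldl_modify_key triples (fun t => pvGet t "subject") []
      (fun _ t => (· ++ [t]))]
    rfl
  have hnd : d.keys.Nodup := by
    rw [hd]
    exact PySem.Dict.nodup_keys_foldl_modify_key triples (fun t => pvGet t "subject") []
      (fun _ t => (· ++ [t])) _ (by simp)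
  have hgetD : ∀ c, d.getD c [] = triples.filter (fun t => pvSubj t == c) := by
    intro c
    have hfold : d = (triples.map (fun t => (pvSubj t, t))).foldl
        (fun d p => d.modify p.1 [] (· ++ [p.2])) (PySem.Dict.mk []) := by
      rw [hd, List.foldl_map]; rfl
    rw [hfold, PySem.Dict.getD_foldl_modify_append]
    simp only [List.filter_map, List.map_map, Function.comp_def]
    rw [show ({ items := [] } : PySem.Dict String (List (List (String × String)))).getD c [] = [] from rfl]
    simp
  rw [PySem.Dict.items_eq_map_keys d hnd ([] : List (List (String × String))), hkeys]
  unfold pvGroups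
  exact List.map_congr_left (fun s _ => by rw [hgetD s])

-- intercalate facts
lemma pv_interc_singleton {α : Type} (sep a : List α) : sep.intercalate [a] = a := by
  simp [List.intercalate]

lemma pv_interc_cons {α : Type} (sep a : List α) (l : List (List α)) (h : l ≠ []) :
    sep.intercalate (a :: l) = a ++ sep ++ sep.intercalate l := by
  cases l with
  | nil => exact absurd rfl h
  | cons b t => simp [List.intercalate, List.intersperse]

lemma pv_interc_append {α : Type} (sep : List α) (b rest : List (List α))
    (hb : b ≠ []) (hr : rest ≠ []) :
    sep.intercalate (b ++ rest) = sep.intercalate b ++ sep ++ sep.intercalate rest := by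
  induction b with
  | nil => exact absurd rfl hb
  | cons x b ih =>
    cases b with
    | nil => rw [pv_interc_singleton]; simpa using pv_interc_cons sep x rest hr
    | cons y b' =>
      rw [List.cons_append, pv_interc_cons sep x ((y :: b') ++ rest) (by simp),
        ih (by simp), pv_interc_cons sep x (y :: b') (by simp)]
      simp

-- joining the flattened blocks = joining the per-block joins (blocks nonempty)
lemma pv_interc_blocks {α : Type} (sep : List α) (bl : List (List (List α)))
    (h : ∀ b ∈ bl, b ≠ []) (zs : List (List α)) :
    sep.intercalate (bl.flatten ++ zs)
      = sep.intercalate (bl.map sep.intercalate ++ zs) := by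
  induction bl with
  | nil => rfl
  | cons b bl ih =>
    have hb : b ≠ [] := h b (by simp)
    by_cases hrest : bl = [] ∧ zs = []
    · rw [hrest.1, hrest.2]; simp [pv_interc_singleton]
    · have hne : bl.flatten ++ zs ≠ [] := by
        intro hc
        rcases List.append_eq_nil_iff.1 hc with ⟨hf, hz⟩
        cases hbl : bl with
        | nil => exact hrest ⟨hbl, hz⟩
        | cons b' bl' =>
          have : b' ≠ [] := h b' (by simp [hbl])
          rw [hbl] at hf
          simp only [List.flatten_cons] at hf
          exact this (List.append_eq_nil_iff.1 hf).1
      have hne' : bl.map sep.intercalate ++ zs ≠ [] := by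
        intro hc
        rcases List.append_eq_nil_iff.1 hc with ⟨hf, hz⟩
        exact hrest ⟨List.map_eq_nil_iff.1 hf, hz⟩
      rw [List.flatten_cons, List.append_assoc,
        pv_interc_append sep b (bl.flatten ++ zs) hb hne,
        ih (fun b' hb' => h b' (by simp [hb'])),
        List.map_cons, List.cons_append, pv_interc_cons sep _ _ hne']

-- the String-level version
lemma pv_join_blocks (sep : String) (bl : List (List String))
    (h : ∀ b ∈ bl, b ≠ []) (zs : List String) :
    PySem.Str.join sep (bl.flatten ++ zs)
      = PySem.Str.join sep (bl.map (PySem.Str.join sep) ++ zs) := by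
  have harg : List.map String.toList (bl.map (PySem.Str.join sep) ++ zs)
      = List.map sep.toList.intercalate (bl.map (List.map String.toList)) ++ List.map String.toList zs := by
    rw [List.map_append, List.map_map, List.map_map]
    congr 1
    apply List.map_congr_left
    intro b _
    simp [PySem.Str.join, PySem.Chars.join]
  have key : PySem.Chars.join sep.toList ((bl.flatten ++ zs).map String.toList)
      = PySem.Chars.join sep.toList ((bl.map (PySem.Str.join sep) ++ zs).map String.toList) := by
    unfold PySem.Chars.join
    rw [harg, List.map_append, List.map_flatten]
    exact pv_interc_blocks sep.toList (bl.map (List.map String.toList))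
      (fun b hb => by
        rcases List.mem_map.1 hb with ⟨b', hb', rfl⟩
        simpa using h b' hb') (zs.map String.toList)
  exact congrArg String.ofList key

-- B's block string is the join of A's block lines for that subject's group
lemma pv_block_eq (triples : List (List (String × String))) (s : String) :
    pvBlock triples s
      = PySem.Str.join "\n" (pvBLines (s, triples.filter (fun t => pvSubj t == s))) := by
  unfold pvBlock
  have hstep : (fun (bu : List String × List String × List String) t =>
      if !(pvGet t "subject" == s) then bu
      else
        let p := pvGet t "predicate"
        let o := pvGet t "object"
        if p == "rdf:type" && pvIgnored.any (fun ig => PySem.Str.isIn ig o) then bu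
        else
          let line := "  " ++ p ++ " " ++ o
          if PySem.Str.isIn "label" (PySem.Str.lower p) then (bu.1 ++ [line], bu.2.1, bu.2.2)
          else if PySem.Str.isIn "type" (PySem.Str.lower p) then (bu.1, bu.2.1 ++ [line], bu.2.2)
          else (bu.1, bu.2.1, bu.2.2 ++ [line])) = pvStepG s := by
    funext bu t
    unfold pvStepG pvStepB pvSubj pvSkip pvIsL pvIsT pvPO pvFmt pvIgnored pvIgnoredTypes
    rfl
  rw [hstep, pv_gate_fold s triples, pv_tri_fold _ [] [] []]
  unfold pvBLines
  dsimp only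
  have h20 : ∀ (l : List String), PySem.List.slice l none (some 20) = l.take 20 := by
    intro l
    rw [PySem.List.slice_to l (b := 20) (by norm_num)]
    rfl
  rw [h20, pv_sorted_eq_filters, List.map_take]
  simp

-- the ports agree
lemma pv_ports_agree (triples : List (List (String × String))) (entity_iris : List String) :
    create_context_summary_py triples entity_iris = create_context_summary_py_alt triples entity_iris := by
  unfold create_context_summary_py create_context_summary_py_alt
  by_cases ht : triples = []
  · simp [ht]
  · simp only [if_neg ht]
    rw [pv_items_eq triples]
    -- name the pieces
    set subjects := PySem.List.dedup (triples.map (fun t => pvGet t "subject")) with hsub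
    have hsub' : PySem.List.dedup (triples.map pvSubj) = subjects := by rw [hsub]; rfl
    set hdr₁ : String := "Retrieved " ++ PySem.Int.toStr (triples.length : Int) ++
      " triples about " ++ PySem.Int.toStr (entity_iris.length : Int) ++ " entities:" with hhdr
    -- slice [:15] is take 15
    have h15 : ∀ {β : Type} (l : List β), PySem.List.slice l none (some 15) = l.take 15 := by
      intro β l
      rw [PySem.List.slice_to l (b := 15) (by norm_num)]
      rfl
    -- A's body fold = flatMap of block lines
    have hlineA : ∀ (init : List String),
        ((pvGroups triples).take 15).foldl
          (fun lines it =>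
            let subject := it.1
            let subject_triples := it.2
            let lines := lines ++ [subject ++ ":"]
            let formatted_props : List (String × String) :=
              subject_triples.foldl
                (fun fp t =>
                  let p := pvGet t "predicate"
                  let o := pvGet t "object"
                  if p == "rdf:type" && pvIgnoredTypes.any (fun ig => PySem.Str.isIn ig o) then fp
                  else fp ++ [(p, o)]) []
            let formatted_props := PySem.List.sorted formatted_props pvSortKey
            let lines :=
              (PySem.List.slice formatted_props none (some 20)).foldl
                (fun lines po => lines ++ ["  " ++ po.1 ++ " " ++ po.2]) lines
            lines ++ [""]) init
        = init ++ ((pvGroups triples).take 15).flatMap pvBLines := by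
      intro init
      have hbody : ∀ (lines : List String) (it : String × List (List (String × String))),
          (let subject := it.1
           let subject_triples := it.2
           let lines := lines ++ [subject ++ ":"]
           let formatted_props : List (String × String) :=
             subject_triples.foldl
               (fun fp t =>
                 let p := pvGet t "predicate"
                 let o := pvGet t "object"
                 if p == "rdf:type" && pvIgnoredTypes.any (fun ig => PySem.Str.isIn ig o) then fp
                 else fp ++ [(p, o)]) []
           let formatted_props := PySem.List.sorted formatted_props pvSortKey
           let lines :=
             (PySem.List.slice formatted_props none (some 20)).foldl
               (fun lines po => lines ++ ["  " ++ po.1 ++ " " ++ po.2]) lines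
           lines ++ [""])
          = lines ++ pvBLines it := by
        intro lines it
        show (PySem.List.slice (PySem.List.sorted (it.2.foldl pvStepA []) pvSortKey) none (some 20)).foldl
            (fun lines po => lines ++ [pvFmt po]) (lines ++ [it.1 ++ ":"]) ++ [""]
          = lines ++ pvBLines it
        rw [PySem.List.foldl_append_singleton_eq_map pvFmt, pv_props_fold it.2]
        have h20 : PySem.List.slice (PySem.List.sorted (pvProps it.2) pvSortKey) none (some 20)
            = (PySem.List.sorted (pvProps it.2) pvSortKey).take 20 := by
          rw [PySem.List.slice_to _ (b := 20) (by norm_num)]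
          rfl
        rw [h20]
        unfold pvBLines
        simp
      calc ((pvGroups triples).take 15).foldl _ init
          = ((pvGroups triples).take 15).foldl (fun lines it => lines ++ pvBLines it) init := by
            rw [show (fun (lines : List String) (it : String × List (List (String × String))) => lines ++ pvBLines it) = _ from funext fun lines => funext fun it => (hbody lines it).symm]
        _ = init ++ ((pvGroups triples).take 15).flatMap pvBLines :=
            PySem.List.foldl_append_eq_flatMap pvBLines _ init
    rw [h15, h15, hlineA]
    -- lengths agree
    have hlen : (pvGroups triples).length = subjects.length := by
      unfold pvGroups
      rw [hsub']
      simp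
    -- the tail
    set tail : List String :=
      (if 15 < subjects.length then
        ["... and " ++ PySem.Int.toStr ((subjects.length : Int) - 15) ++ " more entities"]
      else []) with htail
    have hA : (if 15 < (pvGroups triples).length then
          ([hdr₁, ""] ++ ((pvGroups triples).take 15).flatMap pvBLines) ++
            ["... and " ++ PySem.Int.toStr (((pvGroups triples).length : Int) - 15) ++ " more entities"]
        else ([hdr₁, ""] ++ ((pvGroups triples).take 15).flatMap pvBLines))
        = [hdr₁, ""] ++ ((pvGroups triples).take 15).flatMap pvBLines ++ tail := by
      rw [htail, hlen]
      by_cases h : 15 < subjects.length <;> simp [h]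
    have hB : (if 15 < subjects.length then
          ([hdr₁, ""] ++ (subjects.take 15).map (pvBlock triples)) ++
            ["... and " ++ PySem.Int.toStr ((subjects.length : Int) - 15) ++ " more entities"]
        else ([hdr₁, ""] ++ (subjects.take 15).map (pvBlock triples)))
        = [hdr₁, ""] ++ (subjects.take 15).map (pvBlock triples) ++ tail := by
      rw [htail]
      by_cases h : 15 < subjects.length <;> simp [h]
    rw [hA, hB]
    -- per-block: take 15 of the groups is the groups of take 15 of the subjects
    have hgroups15 : (pvGroups triples).take 15
        = (subjects.take 15).map (fun s => (s, triples.filter (fun t => pvSubj t == s))) := by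
      unfold pvGroups
      rw [hsub', List.map_take]
    -- assemble as blocks and apply the join lemma
    set blocks : List (List String) :=
      [[hdr₁], [""]] ++ ((subjects.take 15).map
        (fun s => pvBLines (s, triples.filter (fun t => pvSubj t == s)))) with hblocks
    have hflat : [hdr₁, ""] ++ ((pvGroups triples).take 15).flatMap pvBLines ++ tail
        = blocks.flatten ++ tail := by
      rw [hblocks, hgroups15]
      simp [-List.map_take, List.flatMap_def, Function.comp_def]
    have hmap : [hdr₁, ""] ++ (subjects.take 15).map (pvBlock triples) ++ tail
        = blocks.map (PySem.Str.join "\n") ++ tail := by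
      rw [hblocks]
      simp only [List.map_append, List.map_cons, List.map_nil, List.map_map]
      have : (subjects.take 15).map (pvBlock triples)
          = (subjects.take 15).map ((PySem.Str.join "\n") ∘
              (fun s => pvBLines (s, triples.filter (fun t => pvSubj t == s)))) := by
        exact List.map_congr_left (fun s _ => by
          rw [Function.comp_apply, ← pv_block_eq])
      rw [this]
      simp [pv_interc_singleton, PySem.Str.join, PySem.Chars.join]
    rw [hflat, hmap]
    exact pv_join_blocks "\n" blocks
      (fun b hb => by
        rw [hblocks] at hb
        rcases List.mem_append.1 hb with h | h
        · simp only [List.mem_cons, List.not_mem_nil, or_false] at h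
          rcases h with rfl | rfl <;> simp
        · rcases List.mem_map.1 h with ⟨s, _, rfl⟩
          unfold pvBLines
          simp) tail

-- ===== VERDICT (by name: the statement is the Claim_ definition above) =====
theorem create_context_summary_py_spec : Claim_equal_create_context_summary_py := by
  intro triples entity_iris _ _
  unfold Spec_create_context_summary_py
  exact pv_ports_agree triples entity_iris
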